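-- pv_equiv track=rewrite | github.com/GThiago/Subset | Subset.py | aux
-- ===== SOURCE A (Python) =====
-- def ArrayAdditionI(arr, res):
--   if len(arr) == 0:
--     return False
--   elif arr[0] == res:
--     return True
--   else:
--     return ArrayAdditionI(arr[1:], res-arr[0]) or ArrayAdditionI(arr[1:],res)
--
-- def aux(arr):
--   aux = []
--   for n in arr:
--     aux1 = arr
--     for i in aux1:
--       if (i != n):
--         aux.append(i)
--     if ArrayAdditionI(aux,n):
--       return True
--     aux = []
--   return False
-- ===== SOURCE B (Python) =====
-- def aux(arr):
--     for n in arr: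
--         sums = set()  # nonempty-subset sums of elements != n, via DP
--         for x in arr:
--             if x != n:
--                 sums |= {s + x for s in sums}
--                 sums.add(x)
--         if n in sums:
--             return True
--     return False
-- ===== Notes on version B (the rewrite author's own statement) =====
-- stated objective: alternative
-- what changed: Replaced A's exponential branching recursion ArrayAdditionI (try/skip each element, with the candidate list rebuilt and the recursion restarted for every n) by a forward set-based DP per n that maintains the set of reachable nonempty subset sums of the elements != n and tests membership of n.
import Mathlib
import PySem

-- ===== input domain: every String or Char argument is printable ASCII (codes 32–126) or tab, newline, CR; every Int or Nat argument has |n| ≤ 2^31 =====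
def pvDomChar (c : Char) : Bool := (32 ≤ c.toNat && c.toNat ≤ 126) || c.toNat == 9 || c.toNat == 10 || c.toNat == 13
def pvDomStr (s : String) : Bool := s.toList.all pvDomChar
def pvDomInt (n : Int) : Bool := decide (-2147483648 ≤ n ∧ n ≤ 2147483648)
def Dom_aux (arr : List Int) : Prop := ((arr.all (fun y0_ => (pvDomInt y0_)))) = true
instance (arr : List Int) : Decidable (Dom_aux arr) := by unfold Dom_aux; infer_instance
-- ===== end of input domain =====

-- B replaces A's branching try/skip subset-sum recursion by a set-based DP over
-- reachable nonempty subset sums (objective: alternative algorithm).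

-- ===== PORT A =====
def ArrayAdditionI : List Int → Int → Bool
  | [], _ => false
  | a :: t, res => if a = res then true else ArrayAdditionI t (res - a) || ArrayAdditionI t res

def auxLoop (full : List Int) : List Int → Bool
  | [] => false
  | n :: rest =>
      -- inner for-loop: aux = [i for i in arr if i != n] built by appends
      let l := full.foldl (fun acc i => if i ≠ n then acc ++ [i] else acc) []
      if ArrayAdditionI l n then true else auxLoop full rest

def aux (arr : List Int) : Bool := auxLoop arr arr

-- ===== PORT B =====
def sumsStep (n : Int) (s : PySem.Set Int) (x : Int) : PySem.Set Int :=
  if x ≠ n then PySem.Set.add (PySem.Set.union s (s.map (· + x))) x else s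

def aux_alt (arr : List Int) : Bool :=
  arr.any (fun n => PySem.Set.contains (arr.foldl (sumsStep n) PySem.Set.empty) n)

-- ===== PRECONDITION & SPEC =====
def Spec_aux (arr : List Int) (out : Bool) : Prop := out = aux_alt arr
instance (arr : List Int) (out : Bool) : Decidable (Spec_aux arr out) := by unfold Spec_aux; infer_instance

-- ===== CLAIM (what is proved, stated in full; the proofs are below) =====
def Claim_equal_aux : Prop := ∀ (arr : List Int), Dom_aux arr → Spec_aux arr (aux arr)

-- ===== LEMMAS AND PROOFS =====

-- r is a nonempty-subset sum of the list (head-recursive, matching ArrayAdditionI)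
def SS : List Int → Int → Prop
  | [], _ => False
  | x :: t, r => x = r ∨ SS t (r - x) ∨ SS t r

theorem AAI_iff (xs : List Int) (r : Int) : ArrayAdditionI xs r = true ↔ SS xs r := by
  induction xs generalizing r with
  | nil => simp [ArrayAdditionI, SS]
  | cons a t ih =>
      by_cases h : a = r <;> simp [ArrayAdditionI, SS, h, ih]

theorem SS_snoc (p : List Int) (x r : Int) :
    SS (p ++ [x]) r ↔ SS p r ∨ (∃ s, SS p s ∧ r = s + x) ∨ r = x := by
  induction p generalizing r with
  | nil => simp [SS, eq_comm]
  | cons y p ih =>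
      show (y = r ∨ SS (p ++ [x]) (r - y) ∨ SS (p ++ [x]) r) ↔ _
      rw [ih, ih]
      constructor
      · rintro (h | (h | ⟨s, hs, he⟩ | he) | (h | ⟨s, hs, he⟩ | he))
        · exact Or.inl (Or.inl h)
        · exact Or.inl (Or.inr (Or.inl h))
        · exact Or.inr (Or.inl ⟨s + y, Or.inr (Or.inl (by simpa using hs)), by omega⟩)
        · exact Or.inr (Or.inl ⟨y, Or.inl rfl, by omega⟩)
        · exact Or.inl (Or.inr (Or.inr h))
        · exact Or.inr (Or.inl ⟨s, Or.inr (Or.inr hs), he⟩)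
        · exact Or.inr (Or.inr he)
      · rintro ((h | h | h) | ⟨s, (hs | hs | hs), he⟩ | he)
        · exact Or.inl h
        · exact Or.inr (Or.inl (Or.inl h))
        · exact Or.inr (Or.inr (Or.inl h))
        · subst hs; exact Or.inr (Or.inl (Or.inr (Or.inr (by omega))))
        · exact Or.inr (Or.inl (Or.inr (Or.inl ⟨s - y, hs, by omega⟩)))
        · exact Or.inr (Or.inr (Or.inr (Or.inl ⟨s, hs, he⟩)))
        · exact Or.inr (Or.inr (Or.inr (Or.inr he)))

theorem mem_fold (n : Int) (xs : List Int) (z : Int) :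
    z ∈ xs.foldl (sumsStep n) PySem.Set.empty ↔ SS (xs.filter (fun i => i ≠ n)) z := by
  induction xs using List.reverseRecOn generalizing z with
  | nil => simp [PySem.Set.empty, SS]
  | append_singleton xs x ih =>
      rw [List.foldl_append, List.filter_append]
      by_cases h : x = n
      · simpa [sumsStep, h] using ih z
      · rw [show List.filter (fun i => decide (i ≠ n)) [x] = [x] by simp [h]]
        rw [SS_snoc]
        simp only [List.foldl_cons, List.foldl_nil]
        rw [show sumsStep n (xs.foldl (sumsStep n) PySem.Set.empty) x
              = PySem.Set.add (PySem.Set.union (xs.foldl (sumsStep n) PySem.Set.empty)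
                  ((xs.foldl (sumsStep n) PySem.Set.empty).map (· + x))) x by simp [sumsStep, h]]
        simp only [PySem.Set.mem_add, PySem.Set.mem_union, List.mem_map]
        constructor
        · rintro ((h1 | ⟨w, hw, rfl⟩) | h1)
          · exact Or.inl ((ih z).mp h1)
          · exact Or.inr (Or.inl ⟨w, (ih w).mp hw, rfl⟩)
          · exact Or.inr (Or.inr h1)
        · rintro (h1 | ⟨s, hs, rfl⟩ | h1)
          · exact Or.inl (Or.inl ((ih z).mpr h1))
          · exact Or.inl (Or.inr ⟨s, (ih s).mpr hs, rfl⟩)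
          · exact Or.inr h1

theorem auxLoop_any (full rest : List Int) :
    auxLoop full rest = rest.any (fun n => ArrayAdditionI (full.filter (fun i => decide (i ≠ n))) n) := by
  induction rest with
  | nil => rfl
  | cons n t ih =>
      show (if ArrayAdditionI (full.foldl (fun acc i => if i ≠ n then acc ++ [i] else acc) []) n
              then true else auxLoop full t) = _
      rw [show (fun acc (i : Int) => if i ≠ n then acc ++ [i] else acc)
            = (fun acc (i : Int) => if decide (i ≠ n) = true then acc ++ [i] else acc) by
          funext acc i; split <;> simp_all]
      rw [PySem.List.foldl_append_if, ih, List.any_cons]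
      split <;> simp_all

theorem pred_eq (arr : List Int) (n : Int) :
    ArrayAdditionI (arr.filter (fun i => decide (i ≠ n))) n
      = PySem.Set.contains (arr.foldl (sumsStep n) PySem.Set.empty) n := by
  rw [Bool.eq_iff_iff, AAI_iff, PySem.Set.contains_iff, mem_fold]

-- ===== VERDICT (by name: the statement is the Claim_ definition above) =====
theorem aux_spec : Claim_equal_aux := by
  intro arr _
  show aux arr = aux_alt arr
  rw [aux, auxLoop_any, aux_alt]
  exact congrArg _ (funext fun n => pred_eq arr n)
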